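-- pv_equiv track=rewrite | github.com/MrBrantCode/unitest_baseline | mut_generate/mist_train_cf/cf_89413/solution.py | find_shortest_subsequence
-- ===== SOURCE A (Python) =====
-- def find_shortest_subsequence(string, word1, word2):
--     word1_pos = -1
--     word2_pos = -1
--     min_length = float('inf')
--     min_subsequence = ""
--
--     for i in range(len(string)):
--         if string[i:].startswith(word1):
--             word1_pos = i
--         if string[i:].startswith(word2):
--             word2_pos = i
--
--         if word1_pos != -1 and word2_pos != -1:
--             length = max(word1_pos, word2_pos) + max(len(word1), len(word2)) - min(word1_pos, word2_pos)
--             if length < min_length: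
--                 min_length = length
--                 if word1_pos < word2_pos:
--                     min_subsequence = string[word1_pos:word2_pos+len(word2)]
--                 else:
--                     min_subsequence = string[word2_pos:word1_pos+len(word1)]
--
--     if min_subsequence == "":
--         return "Words not found in the string"
--
--     return min_subsequence
-- ===== SOURCE B (Python) =====
-- def find_shortest_subsequence(string, word1, word2):
--     n = len(string)
--     # phase 1: collect all start positions of each word (in-place tests, no slice copies)
--     occ1 = [i for i in range(n) if string.startswith(word1, i)]
--     occ2 = [i for i in range(n) if string.startswith(word2, i)]
--     width = max(len(word1), len(word2))
--     # phase 2: two-pointer merge of the two sorted occurrence lists,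
--     # replaying the best-candidate update at each occurrence event
--     p1 = -1
--     p2 = -1
--     best_len = None
--     best = ""
--     i1 = 0
--     i2 = 0
--     while i1 < len(occ1) or i2 < len(occ2):
--         if i1 < len(occ1) and (i2 == len(occ2) or occ1[i1] <= occ2[i2]):
--             e = occ1[i1]
--         else:
--             e = occ2[i2]
--         if i1 < len(occ1) and occ1[i1] == e:
--             p1 = e
--             i1 += 1
--         if i2 < len(occ2) and occ2[i2] == e:
--             p2 = e
--             i2 += 1
--         length = max(p1, p2) + width - min(p1, p2)
--         if p1 != -1 and p2 != -1 and (best_len is None or length < best_len):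
--             best_len = length
--             if p1 < p2:
--                 best = string[p1:p2 + len(word2)]
--             else:
--                 best = string[p2:p1 + len(word1)]
--     if best == "":
--         return "Words not found in the string"
--     return best
-- ===== Notes on version B (the rewrite author's own statement) =====
-- stated objective: faster
-- what changed: A rescans the string with an O(n) slice copy per position while tracking last occurrences inline; B first collects each word's occurrence positions with in-place startswith tests, then replays the same best-candidate update over a two-pointer merge of the two sorted occurrence lists.
import Mathlib
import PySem

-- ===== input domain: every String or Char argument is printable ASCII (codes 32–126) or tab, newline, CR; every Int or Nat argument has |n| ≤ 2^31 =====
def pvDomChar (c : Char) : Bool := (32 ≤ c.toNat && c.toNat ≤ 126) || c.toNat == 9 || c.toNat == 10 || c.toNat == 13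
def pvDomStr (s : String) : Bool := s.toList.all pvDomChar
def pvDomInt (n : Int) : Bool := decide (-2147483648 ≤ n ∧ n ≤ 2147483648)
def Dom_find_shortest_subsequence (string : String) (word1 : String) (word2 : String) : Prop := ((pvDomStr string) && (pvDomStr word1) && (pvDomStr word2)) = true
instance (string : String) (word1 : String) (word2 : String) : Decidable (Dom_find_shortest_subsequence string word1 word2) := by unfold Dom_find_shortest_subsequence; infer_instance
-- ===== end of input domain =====

-- B replaces A's single scan over per-position slice copies (Θ(n) copy per position) by two
-- in-place occurrence-list passes followed by a two-pointer merge replaying the same candidate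
-- update; objective: faster (a timing run measured the speed-up).

-- ===== PORT A =====
-- Loop body of A.  Python's `min_length = float('inf')` is modeled as `none : Option Int`
-- (it is only ever compared with `<`, never used arithmetically): `Option.all` is exactly
-- `length < min_length` with `none` = infinity.
def aStep (string word1 word2 : String) (s : Int × Int × Option Int × String) (i : Int) :
    Int × Int × Option Int × String :=
  let p1 := if PySem.Str.startswith (PySem.Str.slice string (some i) none) word1 then i else s.1
  let p2 := if PySem.Str.startswith (PySem.Str.slice string (some i) none) word2 then i else s.2.1
  if p1 ≠ -1 ∧ p2 ≠ -1 then
    let length := max p1 p2 + max (PySem.Str.len word1) (PySem.Str.len word2) - min p1 p2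
    if s.2.2.1.all (fun v => length < v) then
      (p1, p2, some length,
        if p1 < p2 then PySem.Str.slice string (some p1) (some (p2 + PySem.Str.len word2))
        else PySem.Str.slice string (some p2) (some (p1 + PySem.Str.len word1)))
    else (p1, p2, s.2.2.1, s.2.2.2)
  else (p1, p2, s.2.2.1, s.2.2.2)

def find_shortest_subsequence (string : String) (word1 : String) (word2 : String) : String :=
  let r := (PySem.List.pyRange 0 (PySem.Str.len string) 1).foldl (aStep string word1 word2)
    (-1, -1, none, "")
  if r.2.2.2 = "" then "Words not found in the string" else r.2.2.2

-- ===== PORT B =====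
-- `[i for i in range(n) if string.startswith(w, i)]`; for `0 ≤ i` the start parameter of
-- Python's startswith is exact as `startswith` on the dropped tail (hand port, exact there).
def bOcc (string w : String) : List Int :=
  (PySem.List.pyRange 0 (PySem.Str.len string) 1).filter
    (fun i => PySem.Chars.startswith (string.toList.drop i.toNat) w.toList)

-- the candidate update run once per merge event (`best_len is None or …` is `Option.all`)
def bUpd (string word1 word2 : String) (width : Int) (p1 p2 : Int)
    (s : Int × Int × Option Int × String) : Int × Int × Option Int × String :=
  let length := max p1 p2 + width - min p1 p2
  if p1 ≠ -1 ∧ p2 ≠ -1 ∧ s.2.2.1.all (fun v => length < v) then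
    (p1, p2, some length,
      if p1 < p2 then PySem.Str.slice string (some p1) (some (p2 + PySem.Str.len word2))
      else PySem.Str.slice string (some p2) (some (p1 + PySem.Str.len word1)))
  else (p1, p2, s.2.2.1, s.2.2.2)

-- the two-pointer while loop over the suffixes of the two occurrence lists
def bLoop (string word1 word2 : String) (width : Int) :
    List Int → List Int → Int × Int × Option Int × String → Int × Int × Option Int × String
  | [], [], s => s
  | a :: t1, [], s => bLoop string word1 word2 width t1 [] (bUpd string word1 word2 width a s.2.1 s)
  | [], b :: t2, s => bLoop string word1 word2 width [] t2 (bUpd string word1 word2 width s.1 b s)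
  | a :: t1, b :: t2, s =>
    if a < b then
      bLoop string word1 word2 width t1 (b :: t2) (bUpd string word1 word2 width a s.2.1 s)
    else if b < a then
      bLoop string word1 word2 width (a :: t1) t2 (bUpd string word1 word2 width s.1 b s)
    else
      bLoop string word1 word2 width t1 t2 (bUpd string word1 word2 width a b s)
  termination_by l1 l2 _ => l1.length + l2.length
  decreasing_by all_goals simp <;> omega

def find_shortest_subsequence_alt (string : String) (word1 : String) (word2 : String) : String :=
  let occ1 := bOcc string word1
  let occ2 := bOcc string word2
  let width := max (PySem.Str.len word1) (PySem.Str.len word2)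
  let r := bLoop string word1 word2 width occ1 occ2 (-1, -1, none, "")
  if r.2.2.2 = "" then "Words not found in the string" else r.2.2.2

-- ===== PRECONDITION & SPEC =====
def Spec_find_shortest_subsequence (string : String) (word1 : String) (word2 : String) (out : String) : Prop := out = find_shortest_subsequence_alt string word1 word2
instance (string : String) (word1 : String) (word2 : String) (out : String) : Decidable (Spec_find_shortest_subsequence string word1 word2 out) := by unfold Spec_find_shortest_subsequence; infer_instance

-- ===== CLAIM (what is proved, stated in full; the proofs are below) =====
def Claim_equal_find_shortest_subsequence : Prop := ∀ (string : String) (word1 : String) (word2 : String), Dom_find_shortest_subsequence string word1 word2 → Spec_find_shortest_subsequence string word1 word2 (find_shortest_subsequence string word1 word2)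

-- ===== LEMMAS AND PROOFS =====

-- A's per-position test equals B's in-place test for a non-negative index
lemma ev_eq (s w : String) (i : Int) (h : 0 ≤ i) :
    PySem.Str.startswith (PySem.Str.slice s (some i) none) w
      = PySem.Chars.startswith (s.toList.drop i.toNat) w.toList := by
  simp [PySem.Str.startswith_eq, PySem.Str.slice, PySem.List.slice_from _ h]

-- loop invariant: once both positions are set, the recorded minimum is at most the
-- length value of the current pair of positions
def pvInv (width : Int) (s : Int × Int × Option Int × String) : Prop :=
  s.1 ≠ -1 → s.2.1 ≠ -1 →
    ∃ v, s.2.2.1 = some v ∧ v ≤ max s.1 s.2.1 + width - min s.1 s.2.1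

lemma aStep_eq_bUpd (string word1 word2 : String) (s : Int × Int × Option Int × String) (i : Int)
    (h : 0 ≤ i) :
    aStep string word1 word2 s i =
      bUpd string word1 word2 (max (PySem.Str.len word1) (PySem.Str.len word2))
        (if PySem.Chars.startswith (string.toList.drop i.toNat) word1.toList then i else s.1)
        (if PySem.Chars.startswith (string.toList.drop i.toNat) word2.toList then i else s.2.1) s := by
  simp only [aStep, bUpd, ev_eq _ _ _ h]
  split_ifs <;> first | rfl | tauto

lemma bUpd_inv (string word1 word2 : String) (width p1 p2 : Int)
    (s : Int × Int × Option Int × String) :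
    pvInv width (bUpd string word1 word2 width p1 p2 s) := by
  simp only [bUpd, pvInv]
  split_ifs with hc hlt
  · intro _ _
    exact ⟨_, rfl, le_refl _⟩
  · intro _ _
    exact ⟨_, rfl, le_refl _⟩
  · intro hp1 hp2
    dsimp only at hp1 hp2 ⊢
    rcases hv : s.2.2.1 with _ | v
    · exact absurd ⟨hp1, hp2, by rw [hv]; rfl⟩ hc
    · refine ⟨v, rfl, ?_⟩
      by_contra hgt
      refine hc ⟨hp1, hp2, ?_⟩
      rw [hv, Option.all_some, decide_eq_true_eq]
      omega

lemma aStep_skip (string word1 word2 : String) (s : Int × Int × Option Int × String) (i : Int)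
    (h : 0 ≤ i)
    (h1 : PySem.Chars.startswith (string.toList.drop i.toNat) word1.toList = false)
    (h2 : PySem.Chars.startswith (string.toList.drop i.toNat) word2.toList = false)
    (hs : pvInv (max (PySem.Str.len word1) (PySem.Str.len word2)) s) :
    aStep string word1 word2 s i = s := by
  simp only [aStep, ev_eq _ _ _ h, h1, h2, Bool.false_eq_true, if_false]
  by_cases hp : s.1 ≠ -1 ∧ s.2.1 ≠ -1
  · obtain ⟨v, hv, hle⟩ := hs hp.1 hp.2
    have hall : s.2.2.1.all
        (fun w => max s.1 s.2.1 + max (PySem.Str.len word1) (PySem.Str.len word2) - min s.1 s.2.1 < w) = false := by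
      rw [hv, Option.all_some, decide_eq_false_iff_not]
      omega
    rw [if_pos hp, if_neg (by rw [hall]; exact Bool.false_ne_true)]
  · rw [if_neg hp]

-- one merge step of bLoop, left/right/both, under sortedness of the remaining events
lemma bLoop_step_left (string word1 word2 : String) (width a : Int) (t1 l2 : List Int)
    (hlt : ∀ j ∈ l2, a < j) (s : Int × Int × Option Int × String) :
    bLoop string word1 word2 width (a :: t1) l2 s
      = bLoop string word1 word2 width t1 l2 (bUpd string word1 word2 width a s.2.1 s) := by
  cases l2 with
  | nil => rw [bLoop]
  | cons b t2 =>
    have hab : a < b := hlt b (by simp)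
    rw [bLoop, if_pos hab]

lemma bLoop_step_right (string word1 word2 : String) (width b : Int) (l1 t2 : List Int)
    (hlt : ∀ j ∈ l1, b < j) (s : Int × Int × Option Int × String) :
    bLoop string word1 word2 width l1 (b :: t2) s
      = bLoop string word1 word2 width l1 t2 (bUpd string word1 word2 width s.1 b s) := by
  cases l1 with
  | nil => rw [bLoop]
  | cons a t1 =>
    have hba : b < a := hlt a (by simp)
    rw [bLoop, if_neg (by omega), if_pos hba]

lemma bLoop_step_both (string word1 word2 : String) (width a : Int) (t1 t2 : List Int)
    (s : Int × Int × Option Int × String) :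
    bLoop string word1 word2 width (a :: t1) (a :: t2) s
      = bLoop string word1 word2 width t1 t2 (bUpd string word1 word2 width a a s) := by
  rw [bLoop, if_neg (lt_irrefl a), if_neg (lt_irrefl a)]

-- the main correspondence: folding A's step over a sorted list of non-negative indices
-- equals B's two-pointer merge over the filtered occurrence sublists
lemma loop_eq (string word1 word2 : String) (is : List Int)
    (hpos : ∀ i ∈ is, 0 ≤ i) (hsort : is.Pairwise (· < ·))
    (s : Int × Int × Option Int × String)
    (hs : pvInv (max (PySem.Str.len word1) (PySem.Str.len word2)) s) :
    bLoop string word1 word2 (max (PySem.Str.len word1) (PySem.Str.len word2))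
      (is.filter (fun i => PySem.Chars.startswith (string.toList.drop i.toNat) word1.toList))
      (is.filter (fun i => PySem.Chars.startswith (string.toList.drop i.toNat) word2.toList)) s
      = is.foldl (aStep string word1 word2) s := by
  induction is generalizing s with
  | nil => simp only [List.filter_nil, List.foldl_nil]; rw [bLoop]
  | cons i is ih =>
    have hi : 0 ≤ i := hpos i (by simp)
    obtain ⟨hlt, hsort'⟩ := List.pairwise_cons.mp hsort
    have hpos' : ∀ j ∈ is, 0 ≤ j := fun j hj => hpos j (by simp [hj])
    have hlt1 : ∀ j ∈ is.filter (fun i => PySem.Chars.startswith (string.toList.drop i.toNat) word1.toList), i < j :=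
      fun j hj => hlt j (List.mem_of_mem_filter hj)
    have hlt2 : ∀ j ∈ is.filter (fun i => PySem.Chars.startswith (string.toList.drop i.toNat) word2.toList), i < j :=
      fun j hj => hlt j (List.mem_of_mem_filter hj)
    simp only [List.foldl_cons, List.filter_cons]
    by_cases e1 : PySem.Chars.startswith (string.toList.drop i.toNat) word1.toList
    · by_cases e2 : PySem.Chars.startswith (string.toList.drop i.toNat) word2.toList
      · simp only [e1, e2, if_true]
        rw [bLoop_step_both, ih hpos' hsort' _ (bUpd_inv _ _ _ _ _ _ _),
          aStep_eq_bUpd _ _ _ _ _ hi, if_pos e1, if_pos e2]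
      · simp only [e1, e2, if_true, Bool.false_eq_true, if_false]
        rw [bLoop_step_left _ _ _ _ _ _ _ hlt2, ih hpos' hsort' _ (bUpd_inv _ _ _ _ _ _ _),
          aStep_eq_bUpd _ _ _ _ _ hi, if_pos e1, if_neg e2]
    · by_cases e2 : PySem.Chars.startswith (string.toList.drop i.toNat) word2.toList
      · simp only [e1, e2, if_true, Bool.false_eq_true, if_false]
        rw [bLoop_step_right _ _ _ _ _ _ _ hlt1, ih hpos' hsort' _ (bUpd_inv _ _ _ _ _ _ _),
          aStep_eq_bUpd _ _ _ _ _ hi, if_neg e1, if_pos e2]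
      · simp only [e1, e2, Bool.false_eq_true, if_false]
        rw [ih hpos' hsort' _ hs,
          aStep_skip _ _ _ _ _ hi (by simpa using e1) (by simpa using e2) hs]

-- ===== VERDICT (by name: the statement is the Claim_ definition above) =====
theorem find_shortest_subsequence_spec : Claim_equal_find_shortest_subsequence := by
  intro string word1 word2 _
  simp only [Spec_find_shortest_subsequence, find_shortest_subsequence,
    find_shortest_subsequence_alt, bOcc]
  rw [loop_eq string word1 word2 (PySem.List.pyRange 0 (PySem.Str.len string) 1)
    (fun i hi => ((PySem.List.mem_pyRange_one).mp hi).1)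
    (PySem.List.pairwise_lt_pyRange_one _ _)
    (-1, -1, none, "")
    (fun h _ => absurd rfl h)]
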